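-- pv_equiv track=rewrite | github.com/vuvova/gdb-tools | duel/expr.py | path2str
-- ===== SOURCE A (Python) =====
-- def path2str(path):
--     if len(path) == 1: return path[0]
--     s, prev, cnt = path[0], path[1], 1
--     for m in path[2:] + [None]:
--         if m == prev: cnt += 1
--         else:
--             if cnt == 1: s += '->{}'.format(prev)
--             else: s += '-->{}[[{}]]'.format(prev, cnt)
--             prev, cnt = m, 1
--     return s
-- ===== SOURCE B (Python) =====
-- def path2str(path):
--     if len(path) == 1:
--         return path[0]
--     runs = []
--     for m in path[1:]:
--         if runs and runs[-1][0] == m: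
--             v, c = runs[-1]
--             runs[-1] = (v, c + 1)
--         else:
--             runs.append((m, 1))
--     return path[0] + ''.join(
--         '->{}'.format(v) if c == 1 else '-->{}[[{}]]'.format(v, c)
--         for v, c in runs)
-- ===== Notes on version B (the rewrite author's own statement) =====
-- stated objective: alternative
-- what changed: B first builds the run-length encoding of path[1:] as an explicit list of (value,count) runs and then renders it with a single join, instead of A's one-pass state machine with a trailing None sentinel that formats while scanning.
import Mathlib
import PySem

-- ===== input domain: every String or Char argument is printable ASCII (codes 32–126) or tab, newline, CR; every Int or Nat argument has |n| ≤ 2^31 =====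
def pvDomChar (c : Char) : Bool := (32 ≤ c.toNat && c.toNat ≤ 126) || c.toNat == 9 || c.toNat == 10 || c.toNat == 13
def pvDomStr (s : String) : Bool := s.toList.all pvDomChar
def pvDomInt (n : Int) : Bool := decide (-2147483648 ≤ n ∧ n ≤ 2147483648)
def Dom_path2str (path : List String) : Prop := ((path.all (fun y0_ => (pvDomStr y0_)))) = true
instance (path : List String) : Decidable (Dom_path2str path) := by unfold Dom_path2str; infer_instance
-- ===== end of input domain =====

-- B builds the run-length encoding of path[1:] explicitly and then renders the runs with one join,
-- instead of A's one-pass sentinel state machine; alternative decomposition, same cost.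


-- ===== PORT A =====
-- flush formatting: '->{}'.format(prev) / '-->{}[[{}]]'.format(prev, cnt); prev is an Option
-- (the sentinel is None); format(None) would print "None" but a flush only ever sees a string.
def pathFlushA (s : String) (prev : Option String) (cnt : Int) : String :=
  if cnt == 1 then s ++ "->" ++ prev.getD "None"
  else s ++ "-->" ++ prev.getD "None" ++ "[[" ++ PySem.Int.toStr cnt ++ "]]"

def pathLoopA (s : String) (prev : Option String) (cnt : Int) : List (Option String) → String
  | [] => s
  | m :: ms =>
    if m == prev then pathLoopA s prev (cnt + 1) ms
    else pathLoopA (pathFlushA s prev cnt) m 1 ms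

def path2str (path : List String) : String :=
  if path.length == 1 then path.headD ""     -- path[0]; nonempty when the guard holds
  else
    match path with
    | [] => ""                               -- Python raises IndexError here; excluded by Pre_
    | [_] => ""                              -- unreachable (length == 1 handled above)
    | p0 :: p1 :: rest =>
      -- s, prev, cnt = path[0], path[1], 1; for m in path[2:] + [None]: ...
      pathLoopA p0 (some p1) 1 (rest.map some ++ [none])

-- ===== PORT B =====
-- runs[-1] update / append of B's loop body
def pathBumpB (runs : List (String × Int)) (m : String) : List (String × Int) :=
  match runs.getLast? with
  | some (v, c) => if v == m then runs.dropLast ++ [(v, c + 1)] else runs ++ [(m, 1)]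
  | none => runs ++ [(m, 1)]

def pathFmtB (r : String × Int) : String :=
  if r.2 == 1 then "->" ++ r.1
  else "-->" ++ r.1 ++ "[[" ++ PySem.Int.toStr r.2 ++ "]]"

def path2str_alt (path : List String) : String :=
  if path.length == 1 then path.headD ""
  else
    match path with
    | [] => ""                               -- Python raises IndexError here; excluded by Pre_
    | [_] => ""                              -- unreachable
    | p0 :: tail =>
      let runs := tail.foldl pathBumpB []
      p0 ++ String.join (runs.map pathFmtB)

-- ===== PRECONDITION & SPEC =====
-- A raises IndexError on the empty list (path[0]); B raises there too.
def Pre_path2str (path : List String) : Prop := path ≠ []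
instance (path : List String) : Decidable (Pre_path2str path) := by unfold Pre_path2str; infer_instance
def pvWitness_path2str : List String := ["a", "b", "b"]
def Spec_path2str (path : List String) (out : String) : Prop := out = path2str_alt path
instance (path : List String) (out : String) : Decidable (Spec_path2str path out) := by unfold Spec_path2str; infer_instance

-- ===== CLAIM (what is proved, stated in full; the proofs are below) =====
def Claim_equal_path2str : Prop := ∀ (path : List String), Dom_path2str path → Pre_path2str path → Spec_path2str path (path2str path)

-- ===== LEMMAS AND PROOFS =====

lemma str_foldl_append : ∀ (l : List String) (a b : String),
    List.foldl (fun r s => r ++ s) (a ++ b) l = a ++ List.foldl (fun r s => r ++ s) b l := by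
  intro l
  induction l with
  | nil => intro a b; rfl
  | cons x xs ih => intro a b; simp only [List.foldl]; rw [String.append_assoc, ih]

lemma str_foldl_join (l : List String) (a : String) :
    List.foldl (fun r s => r ++ s) a l = a ++ String.join l := by
  have h : a = a ++ "" := by simp
  rw [String.join]
  calc List.foldl (fun r s => r ++ s) a l
      = List.foldl (fun r s => r ++ s) (a ++ "") l := by rw [← h]
    _ = a ++ List.foldl (fun r s => r ++ s) "" l := str_foldl_append l a ""

-- reference run-length encoding, grouping from the front
def pathRunsFrom (p : String) (c : Int) : List String → List (String × Int)
  | [] => [(p, c)]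
  | x :: xs => if x == p then pathRunsFrom p (c + 1) xs else (p, c) :: pathRunsFrom x 1 xs

lemma loopA_runs (xs : List String) : ∀ (s p : String) (c : Int),
    pathLoopA s (some p) c (xs.map some ++ [none]) =
      s ++ String.join ((pathRunsFrom p c xs).map pathFmtB) := by
  induction xs with
  | nil =>
    intro s p c
    simp [pathLoopA, pathRunsFrom, pathFlushA, pathFmtB, String.join]
    split <;> simp [String.append_assoc]
  | cons x xs ih =>
    intro s p c
    by_cases h : x = p
    · subst h
      simp [pathLoopA, pathRunsFrom, ih]
    · have hb : (some x == some p) = false := by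
        rw [beq_eq_false_iff_ne]; simpa using h
      have hb2 : (x == p) = false := by simpa using h
      simp [pathLoopA, pathRunsFrom, hb, hb2, ih, pathFlushA, pathFmtB, String.join,
        String.append_assoc]
      split <;> simp [String.append_assoc, str_foldl_join]

lemma foldl_bump_runs (xs : List String) : ∀ (R : List (String × Int)) (p : String) (c : Int),
    List.foldl pathBumpB (R ++ [(p, c)]) xs = R ++ pathRunsFrom p c xs := by
  induction xs with
  | nil => intro R p c; simp [List.foldl, pathRunsFrom]
  | cons x xs ih =>
    intro R p c
    by_cases h : x = p
    · subst h
      simp [List.foldl, pathBumpB, pathRunsFrom, ih]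
    · have hb : (p == x) = false := by simpa using fun h' => h (h'.symm)
      simp [List.foldl, pathBumpB, pathRunsFrom, hb, h]
      have := ih (R ++ [(p, c)]) x 1
      simpa using this

theorem path2str_spec : Claim_equal_path2str := by
  intro path _ hpre
  unfold Spec_path2str
  match path with
  | [] => exact absurd rfl hpre
  | [p] => simp [path2str, path2str_alt]
  | p0 :: p1 :: rest =>
    have hlen : ((p0 :: p1 :: rest).length == 1) = false := by simp
    simp only [path2str, path2str_alt, hlen]
    rw [loopA_runs]
    have h1 : List.foldl pathBumpB [] (p1 :: rest) = pathRunsFrom p1 1 rest := by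
      have := foldl_bump_runs rest ([] : List (String × Int)) p1 1
      simpa [List.foldl, pathBumpB] using this
    simp [h1]
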